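-- pv_equiv track=rewrite | github.com/qunshansj/Web-Improved-YOLOv5-Bacteria-Detection | create_result_gif.py | _generate_batch_data
-- ===== SOURCE A (Python) =====
-- def _generate_batch_data(sampler, batch_size):
--     batch = []
--     for idx in sampler:
--         batch.append(idx)
--         if len(batch) == batch_size:
--             yield batch
--             batch = []
--     if len(batch) > 0:
--         yield batch
-- ===== SOURCE B (Python) =====
-- from itertools import islice
--
-- def _generate_batch_data(sampler, batch_size):
--     it = iter(sampler)
--     while True:
--         chunk = list(islice(it, batch_size))
--         if not chunk:
--             break
--         yield chunk
-- ===== Notes on version B (the rewrite author's own statement) =====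
-- stated objective: idiomatic
-- what changed: Replaces A's element-by-element accumulate-and-flush loop with a single iterator from which fixed-size chunks are pulled via itertools.islice until exhausted.
-- outside the precondition, e.g. on _generate_batch_data([1, 2], 0): A returns [[1, 2]], B returns []; on _generate_batch_data([1], -1): A returns [[1]], B raises ValueError
import Mathlib
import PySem

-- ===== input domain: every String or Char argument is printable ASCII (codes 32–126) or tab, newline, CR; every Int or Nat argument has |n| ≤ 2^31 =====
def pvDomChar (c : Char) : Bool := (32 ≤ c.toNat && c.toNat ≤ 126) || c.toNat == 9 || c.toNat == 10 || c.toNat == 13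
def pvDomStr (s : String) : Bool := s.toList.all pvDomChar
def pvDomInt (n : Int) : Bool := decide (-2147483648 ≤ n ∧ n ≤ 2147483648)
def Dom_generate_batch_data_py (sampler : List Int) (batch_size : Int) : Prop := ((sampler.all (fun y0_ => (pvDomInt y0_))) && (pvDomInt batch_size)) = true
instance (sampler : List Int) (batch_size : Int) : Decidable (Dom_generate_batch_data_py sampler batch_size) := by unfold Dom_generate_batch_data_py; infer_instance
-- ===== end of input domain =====

-- B replaces A's accumulate-and-flush loop with pulling fixed-size chunks off one iterator
-- (islice-style); return-value equivalence is proved for positive batch_size.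

-- ===== PORT A =====
-- A's loop: append idx to the running batch, flush when its length equals batch_size;
-- after the loop, yield the non-empty remainder.
def genA_step (bs : Int) (s : List (List Int) × List Int) (idx : Int) : List (List Int) × List Int :=
  let batch := s.2 ++ [idx]
  if ((batch.length : Int) == bs) then (s.1 ++ [batch], []) else (s.1, batch)

def generate_batch_data_py (sampler : List Int) (batch_size : Int) : List (List Int) :=
  let s := sampler.foldl (genA_step batch_size) ([], [])
  if s.2.length > 0 then s.1 ++ [s.2] else s.1

-- ===== PORT B =====
-- Source B's loop: chunk = next batch_size elements of the iterator; stop when empty.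
-- The remaining-elements view of the iterator is the list suffix: islice = take, rest = drop.
def genB_loop (l : List Int) (n : Nat) : List (List Int) :=
  let chunk := l.take n
  if h : chunk = [] then [] else
    chunk :: genB_loop (l.drop n) n
termination_by l.length
decreasing_by
  have hn : 0 < n := by
    rcases Nat.eq_zero_or_pos n with h0 | h0
    · simp [chunk, h0] at h
    · exact h0
  have hl : l ≠ [] := by
    intro he; simp [chunk, he] at h
  have : 0 < l.length := List.length_pos_iff.mpr hl
  simp [List.length_drop]; omega

def generate_batch_data_py_alt (sampler : List Int) (batch_size : Int) : List (List Int) :=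
  genB_loop sampler batch_size.toNat

-- ===== PRECONDITION & SPEC =====
-- Pre_ excludes nonpositive batch_size, a degenerate corner where A's never-firing flush test
-- accidentally yields the whole sampler as one final batch while B's islice-by-chunks loop
-- yields nothing (batch_size = 0) or raises ValueError (batch_size < 0).
def Pre_generate_batch_data_py (sampler : List Int) (batch_size : Int) : Prop := 1 ≤ batch_size
instance (sampler : List Int) (batch_size : Int) : Decidable (Pre_generate_batch_data_py sampler batch_size) := by unfold Pre_generate_batch_data_py; infer_instance

def pvWitness_generate_batch_data_py : List Int × Int := ([1, 2, 3, 4, 5], 2)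

def Spec_generate_batch_data_py (sampler : List Int) (batch_size : Int) (out : List (List Int)) : Prop := out = generate_batch_data_py_alt sampler batch_size
instance (sampler : List Int) (batch_size : Int) (out : List (List Int)) : Decidable (Spec_generate_batch_data_py sampler batch_size out) := by unfold Spec_generate_batch_data_py; infer_instance

-- ===== CLAIM (what is proved, stated in full; the proofs are below) =====
def Claim_equal_generate_batch_data_py : Prop := ∀ (sampler : List Int) (batch_size : Int), Dom_generate_batch_data_py sampler batch_size → Pre_generate_batch_data_py sampler batch_size → Spec_generate_batch_data_py sampler batch_size (generate_batch_data_py sampler batch_size)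

-- ===== LEMMAS AND PROOFS =====

theorem genB_loop_nil (n : Nat) : genB_loop [] n = [] := by
  rw [genB_loop]; simp

theorem genB_loop_short {l : List Int} {n : Nat} (hne : l ≠ []) (hlen : l.length ≤ n) :
    genB_loop l n = [l] := by
  rw [genB_loop]
  have ht : l.take n = l := List.take_of_length_le hlen
  simp only [ht]
  rw [dif_neg hne]
  have hd : l.drop n = [] := List.drop_eq_nil_of_le hlen
  rw [hd, genB_loop_nil]

theorem genB_loop_chunk {b rest : List Int} {n : Nat} (hlen : b.length = n) (hn : 0 < n) :
    genB_loop (b ++ rest) n = b :: genB_loop rest n := by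
  rw [genB_loop]
  have ht : (b ++ rest).take n = b := by
    rw [← hlen, List.take_left]
  have hd : (b ++ rest).drop n = rest := by
    rw [← hlen, List.drop_left]
  simp only [ht, hd]
  rw [dif_neg]
  intro he
  rw [he] at hlen
  simp at hlen; omega

-- main invariant: A's fold, started with accumulated batches `acc` and a partial batch `b`
-- shorter than batch_size, finishes to `acc ++` the chunking of `b ++ l`.
theorem fold_eq_chunks (bs : Int) (hbs : 1 ≤ bs) :
    ∀ (l : List Int) (acc : List (List Int)) (b : List Int),
      (b.length : Int) < bs →
      (let s := l.foldl (genA_step bs) (acc, b)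
       if s.2.length > 0 then s.1 ++ [s.2] else s.1) = acc ++ genB_loop (b ++ l) bs.toNat := by
  intro l
  induction l with
  | nil =>
    intro acc b hb
    simp only [List.foldl_nil, List.append_nil]
    by_cases hbnil : b = []
    · subst hbnil; simp [genB_loop_nil]
    · have hpos : 0 < b.length := List.length_pos_iff.mpr hbnil
      have hle : b.length ≤ bs.toNat := by omega
      rw [genB_loop_short hbnil hle]
      simp [hpos]
  | cons idx rest ih =>
    intro acc b hb
    simp only [List.foldl_cons]
    by_cases hfull : ((b ++ [idx]).length : Int) = bs
    · have hstep : genA_step bs (acc, b) idx = (acc ++ [b ++ [idx]], []) := by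
        simp only [List.length_append, List.length_cons, List.length_nil] at hfull
        simp [genA_step]
        omega
      rw [hstep]
      have hb0 : ((([] : List Int)).length : Int) < bs := by simp; omega
      rw [ih (acc ++ [b ++ [idx]]) [] hb0]
      have hlen : (b ++ [idx]).length = bs.toNat := by omega
      have hsplit : b ++ idx :: rest = (b ++ [idx]) ++ rest := by simp
      rw [hsplit, genB_loop_chunk hlen (by omega)]
      simp
    · have hstep : genA_step bs (acc, b) idx = (acc, b ++ [idx]) := by
        simp only [List.length_append, List.length_cons, List.length_nil] at hfull
        simp [genA_step]
        omega
      rw [hstep]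
      have hlt : (((b ++ [idx]).length : Int)) < bs := by
        simp at hfull ⊢; omega
      rw [ih acc (b ++ [idx]) hlt]
      simp

-- ===== VERDICT (by name: the statement is the Claim_ definition above) =====
theorem generate_batch_data_py_spec : Claim_equal_generate_batch_data_py := by
  intro sampler batch_size _ hpre
  unfold Spec_generate_batch_data_py generate_batch_data_py generate_batch_data_py_alt
  have h1 : (1 : Int) ≤ batch_size := hpre
  have h := fold_eq_chunks batch_size h1 sampler [] [] (by simp; omega)
  simpa using h
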